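-- pv_equiv track=rewrite | github.com/ShenglingZHU/hiera-tf | packages/htf-py/htf/timeframe.py | _detect_time_columns
-- ===== SOURCE A (Python) =====
-- from collections.abc import Iterable, Mapping, Sequence
-- from typing import Any, Callable, Dict, List, Optional, Tuple, Union
--
-- _TIME_COLUMN_DEFAULTS: Dict[str, List[str]] = {
--     "year": ["year", "Year", "YEAR", "yyyy", "YYYY"],
--     "month": ["month", "Month", "MONTH", "mm", "MM"],
--     "day": ["day", "Day", "DAY", "dd", "DD"],
--     "hour": ["hour", "Hour", "HOUR", "hh", "HH"],
--     "minute": ["minute", "Minute", "MINUTE", "min", "MIN"],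
--     "second": ["second", "Second", "SECOND", "sec", "SEC", "ss", "SS"],
-- }
--
-- def _detect_time_columns(records: Sequence[Mapping[str, Any]]) -> List[str]:
--     keys: set[str] = set()
--     for rec in records:
--         for key in rec.keys():
--             keys.add(str(key))
--     time_cols: List[str] = []
--     for aliases in _TIME_COLUMN_DEFAULTS.values():
--         for alias in aliases:
--             if alias in keys:
--                 time_cols.append(alias)
--                 break
--     return time_cols
-- ===== SOURCE B (Python) =====
-- _TIME_COLUMN_DEFAULTS = {
--     "year": ["year", "Year", "YEAR", "yyyy", "YYYY"],
--     "month": ["month", "Month", "MONTH", "mm", "MM"],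
--     "day": ["day", "Day", "DAY", "dd", "DD"],
--     "hour": ["hour", "Hour", "HOUR", "hh", "HH"],
--     "minute": ["minute", "Minute", "MINUTE", "min", "MIN"],
--     "second": ["second", "Second", "SECOND", "sec", "SEC", "ss", "SS"],
-- }
--
--
-- def _detect_time_columns(records):
--     # Reverse index: alias -> (group position, rank inside the group).
--     groups = list(_TIME_COLUMN_DEFAULTS.values())
--     rev = {a: (gi, r)
--            for gi, aliases in enumerate(groups)
--            for r, a in enumerate(aliases)}
--     # One pass over the data: keep the best (lowest) rank seen per group.
--     best = {}
--     for rec in records: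
--         for key in rec.keys():
--             hit = rev.get(str(key))
--             if hit is not None:
--                 gi, r = hit
--                 if gi not in best or r < best[gi]:
--                     best[gi] = r
--     return [aliases[best[gi]]
--             for gi, aliases in enumerate(groups) if gi in best]
-- ===== Notes on version B (the rewrite author's own statement) =====
-- stated objective: alternative
-- what changed: B inverts the traversal: it builds a reverse index alias->(group,rank) once, streams over the record keys updating the lowest rank seen per group, and emits groups[gi][best[gi]] in group order, instead of A's key-set index followed by a first-hit scan of each alias group.
import Mathlib
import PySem

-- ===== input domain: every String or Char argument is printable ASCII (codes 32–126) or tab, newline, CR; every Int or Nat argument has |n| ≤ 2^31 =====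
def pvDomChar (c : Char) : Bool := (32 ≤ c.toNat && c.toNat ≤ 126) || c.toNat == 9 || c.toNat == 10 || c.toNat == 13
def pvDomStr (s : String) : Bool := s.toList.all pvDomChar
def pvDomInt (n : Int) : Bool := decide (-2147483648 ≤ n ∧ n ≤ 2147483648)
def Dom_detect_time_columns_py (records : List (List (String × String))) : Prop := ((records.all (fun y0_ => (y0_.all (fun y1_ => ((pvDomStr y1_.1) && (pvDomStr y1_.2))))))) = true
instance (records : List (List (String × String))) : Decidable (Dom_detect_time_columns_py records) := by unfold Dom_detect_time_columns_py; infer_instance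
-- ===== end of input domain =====

-- B replaces A's key-set-then-alias-scan by a reverse alias index and one best-rank-per-group
-- pass over the record keys (objective: alternative; same cost).

-- _TIME_COLUMN_DEFAULTS.values(): the alias lists in insertion order (shared module constant)
def pvAliasTable : List (List String) :=
  [["year", "Year", "YEAR", "yyyy", "YYYY"],
   ["month", "Month", "MONTH", "mm", "MM"],
   ["day", "Day", "DAY", "dd", "DD"],
   ["hour", "Hour", "HOUR", "hh", "HH"],
   ["minute", "Minute", "MINUTE", "min", "MIN"],
   ["second", "Second", "SECOND", "sec", "SEC", "ss", "SS"]]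

-- ===== PORT A =====
-- keys = set(); for rec: for key: keys.add(str(key)); then scan each alias list, first-hit append+break
def detect_time_columns_py (records : List (List (String × String))) : List String :=
  let keys : PySem.Set String :=
    records.foldl (fun s rec => rec.foldl (fun s kv => PySem.Set.add s kv.1) s) PySem.Set.empty
  pvAliasTable.foldl
    (fun time_cols aliases =>
      match aliases.find? (fun al => PySem.Set.contains keys al) with
      | some al => time_cols ++ [al]
      | none => time_cols) []

-- ===== PORT B =====
-- rev = {a: (gi, r) for gi, aliases in enumerate(groups) for r, a in enumerate(aliases)}
def pvRev : PySem.Dict String (Int × Int) :=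
  (PySem.List.enumerate pvAliasTable 0).foldl
    (fun d p => (PySem.List.enumerate p.2 0).foldl (fun d q => d.insert q.2 (p.1, q.1)) d)
    PySem.Dict.empty

-- loop body: hit = rev.get(str(key)); if hit: gi, r = hit; if gi not in best or r < best[gi]: best[gi] = r
def pvStep (best : PySem.Dict Int Int) (key : String) : PySem.Dict Int Int :=
  match pvRev.get? key with
  | none => best
  | some (gi, r) =>
    match best.get? gi with
    | none => best.insert gi r
    | some r0 => if r < r0 then best.insert gi r else best

def detect_time_columns_py_alt (records : List (List (String × String))) : List String :=
  let best : PySem.Dict Int Int :=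
    records.foldl (fun b rec => rec.foldl (fun b kv => pvStep b kv.1) b) PySem.Dict.empty
  (PySem.List.enumerate pvAliasTable 0).filterMap
    (fun p => (best.get? p.1).map (fun r => PySem.List.pyGetD p.2 r ""))

-- ===== PRECONDITION & SPEC =====
def Spec_detect_time_columns_py (records : List (List (String × String))) (out : List String) : Prop := out = detect_time_columns_py_alt records
instance (records : List (List (String × String))) (out : List String) : Decidable (Spec_detect_time_columns_py records out) := by unfold Spec_detect_time_columns_py; infer_instance

-- ===== CLAIM (what is proved, stated in full; the proofs are below) =====
def Claim_equal_detect_time_columns_py : Prop := ∀ (records : List (List (String × String))), Dom_detect_time_columns_py records → Spec_detect_time_columns_py records (detect_time_columns_py records)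

-- ===== LEMMAS AND PROOFS =====

-- minimum of two optional ranks
def pvOmin : Option Int → Option Int → Option Int
  | none, b => b
  | some x, none => some x
  | some x, some y => some (min x y)

-- rank of alias k inside group g (0-based), as B's reverse index sees it for that group
def pvHitG : List String → String → Option Int
  | [], _ => none
  | a :: g, k => if a == k then some 0 else (pvHitG g k).map (· + 1)

-- what pvRev contributes to group gi on key k
def pvHit (gi : Int) (k : String) : Option Int :=
  match pvRev.get? k with
  | none => none
  | some (gi', r) => if gi' = gi then some r else none

lemma pvHitG_nonneg (g : List String) (k : String) (r : Int) (h : pvHitG g k = some r) : 0 ≤ r := by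
  induction g generalizing r with
  | nil => simp [pvHitG] at h
  | cons a g ih =>
    simp only [pvHitG] at h
    split at h
    · simp_all
    · rcases Option.map_eq_some_iff.mp h with ⟨r', hr', rfl⟩
      have := ih r' hr'; omega

-- one step of B's loop, seen per group
lemma step_get (b : PySem.Dict Int Int) (k : String) (gi : Int) :
    (pvStep b k).get? gi = pvOmin (pvHit gi k) (b.get? gi) := by
  unfold pvStep pvHit
  cases h : pvRev.get? k with
  | none => simp [pvOmin]
  | some p =>
    obtain ⟨gi', r⟩ := p
    by_cases hgi : gi' = gi
    · subst hgi
      cases hb : b.get? gi' with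
      | none => simp [hb, pvOmin, PySem.Dict.get?_insert_self]
      | some r0 =>
        by_cases hlt : r < r0 <;>
          simp [hb, hlt, pvOmin, PySem.Dict.get?_insert_self, min_def] <;> omega
    · have hne : gi ≠ gi' := fun h => hgi h.symm
      cases hb : b.get? gi' with
      | none => simp [hgi, pvOmin, PySem.Dict.get?_insert_of_ne _ _ hne, hb]
      | some r0 =>
        by_cases hlt : r < r0 <;>
          simp [hgi, hb, hlt, pvOmin, PySem.Dict.get?_insert_of_ne _ _ hne]

lemma pvOmin_assoc (a b c : Option Int) : pvOmin (pvOmin a b) c = pvOmin a (pvOmin b c) := by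
  cases a <;> cases b <;> cases c <;> simp [pvOmin, min_assoc]

lemma pvOmin_comm (a b : Option Int) : pvOmin a b = pvOmin b a := by
  cases a <;> cases b <;> simp [pvOmin, min_comm]

-- the fold of B's loop over a flat key list, per group
def pvM (gi : Int) (ks : List String) : Option Int :=
  ks.foldl (fun m k => pvOmin (pvHit gi k) m) none

lemma pvOmin_none_right (a : Option Int) : pvOmin a none = a := by
  cases a <;> rfl

lemma foldl_pvOmin_start (f : String → Option Int) (l : List String) (m0 : Option Int) :
    l.foldl (fun m k => pvOmin (f k) m) m0
      = pvOmin (l.foldl (fun m k => pvOmin (f k) m) none) m0 := by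
  induction l generalizing m0 with
  | nil => rfl
  | cons x l ih =>
    simp only [List.foldl_cons]
    rw [ih (pvOmin (f x) m0), ih (pvOmin (f x) none), pvOmin_none_right, pvOmin_assoc]

lemma foldl_step_get (ks : List String) (b : PySem.Dict Int Int) (gi : Int) :
    (ks.foldl pvStep b).get? gi = pvOmin (pvM gi ks) (b.get? gi) := by
  induction ks generalizing b with
  | nil => simp [pvM, pvOmin]
  | cons k ks ih =>
    simp only [List.foldl_cons, ih, step_get, pvM]
    rw [foldl_pvOmin_start (pvHit gi) ks (pvOmin (pvHit gi k) none), pvOmin_none_right, pvOmin_assoc]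

-- generic per-group machinery, parametrized by the group list g and hit function pvHitG g
def pvMG (g : List String) (ks : List String) : Option Int :=
  ks.foldl (fun m k => pvOmin (pvHitG g k) m) none

lemma pvMG_start (g : List String) (ks : List String) (m0 : Option Int) :
    ks.foldl (fun m k => pvOmin (pvHitG g k) m) m0 = pvOmin (pvMG g ks) m0 :=
  foldl_pvOmin_start (pvHitG g) ks m0

lemma pvMG_cons_key (g : List String) (k : String) (ks : List String) :
    pvMG g (k :: ks) = pvOmin (pvHitG g k) (pvMG g ks) := by
  simp only [pvMG, List.foldl_cons]
  rw [pvMG_start g ks (pvOmin (pvHitG g k) none), pvOmin_none_right, pvOmin_comm]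
  rfl

lemma pvMG_nonneg (g ks : List String) (r : Int) (h : pvMG g ks = some r) : 0 ≤ r := by
  induction ks generalizing r with
  | nil => simp [pvMG] at h
  | cons k ks ih =>
    rw [pvMG_cons_key] at h
    cases hh : pvHitG g k with
    | none => rw [hh] at h; simp [pvOmin] at h; exact ih r (by cases hm : pvMG g ks <;> simp_all)
    | some x =>
      have hx := pvHitG_nonneg g k x hh
      rw [hh] at h
      cases hm : pvMG g ks with
      | none => rw [hm] at h; simp [pvOmin] at h; omega
      | some y =>
        have hy := ih y hm
        rw [hm] at h; simp [pvOmin] at h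
        rcases h with rfl; rcases le_total x y with hxy | hxy <;> simp [hxy] <;> omega

lemma pvOmin_map_succ (x y : Option Int) :
    pvOmin (x.map (· + 1)) (y.map (· + 1)) = (pvOmin x y).map (· + 1) := by
  cases x <;> cases y <;> simp [pvOmin, min_add_add_right]

lemma pvMG_cons (a : String) (g ks : List String) :
    pvMG (a :: g) ks = if ks.contains a then some 0 else (pvMG g ks).map (· + 1) := by
  induction ks with
  | nil => simp [pvMG]
  | cons k ks ih =>
    rw [pvMG_cons_key, ih]
    by_cases hak : a = k
    · subst hak
      have hG : pvHitG (a :: g) a = some 0 := by simp [pvHitG]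
      have hc : (a :: ks).contains a = true := by simp
      rw [hG, hc, if_pos rfl]
      by_cases hk : ks.contains a = true
      · rw [if_pos hk]; simp [pvOmin]
      · rw [if_neg (by simpa using hk)]
        cases hm : pvMG g ks with
        | none => simp [pvOmin]
        | some y =>
          have hy := pvMG_nonneg g ks y hm
          simp only [Option.map_some, pvOmin, Option.some.injEq]
          omega
    · have hG : pvHitG (a :: g) k = (pvHitG g k).map (· + 1) := by
        simp [pvHitG, beq_eq_false_iff_ne.mpr hak]
      have hcons : (k :: ks).contains a = ks.contains a := by
        simp only [List.contains_cons, beq_eq_false_iff_ne.mpr hak, Bool.false_or]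
      rw [hG, hcons]
      by_cases hc : ks.contains a = true
      · rw [if_pos hc, if_pos hc]
        cases hh : pvHitG g k with
        | none => simp [pvOmin]
        | some x =>
          have hx := pvHitG_nonneg g k x hh
          simp only [Option.map_some, pvOmin, Option.some.injEq]
          omega
      · rw [if_neg (by simpa using hc), if_neg (by simpa using hc), pvOmin_map_succ,
            pvMG_cons_key g k ks]

lemma pvMG_nil (ks : List String) : pvMG [] ks = none := by
  induction ks with
  | nil => rfl
  | cons k ks ih => rw [pvMG_cons_key]; simpa [pvHitG, pvOmin] using ih

-- index-then-lookup equals first-match, per group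
lemma pvMG_find (g ks : List String) :
    (pvMG g ks).map (fun r => PySem.List.pyGetD g r "") = g.find? (fun a => ks.contains a) := by
  induction g with
  | nil => simp [pvMG_nil]
  | cons a g ih =>
    rw [pvMG_cons]
    by_cases h : ks.contains a = true
    · rw [if_pos h, List.find?_cons_of_pos (by simpa using h)]
      simp [PySem.List.pyGetD_zero_cons]
    · rw [if_neg (by simpa using h), List.find?_cons_of_neg (by simpa using h), ← ih]
      cases hm : pvMG g ks with
      | none => simp
      | some r =>
        have hr := pvMG_nonneg g ks r hm
        simp only [Option.map_some, Option.some.injEq]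
        have h1 : r + 1 = ((r.toNat + 1 : Nat) : Int) := by omega
        have h2 : r = ((r.toNat : Nat) : Int) := by omega
        rw [h1, PySem.List.pyGetD_natCast, h2, PySem.List.pyGetD_natCast]
        simp [max_eq_left hr]

-- A's nested key-set fold: membership characterization
lemma mem_keys_fold (records : List (List (String × String))) (s : PySem.Set String) (x : String) :
    x ∈ records.foldl (fun s rec => rec.foldl (fun s kv => PySem.Set.add s kv.1) s) s ↔
      x ∈ s ∨ ∃ rec ∈ records, ∃ kv ∈ rec, x = kv.1 := by
  induction records generalizing s with
  | nil => simp
  | cons rec rest ih =>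
    simp only [List.foldl_cons, ih, PySem.Set.mem_foldl_add]
    constructor
    · rintro (⟨h | ⟨kv, hkv, hx⟩⟩ | ⟨r, hr, kv, hkv, hx⟩)
      · exact Or.inl h
      · exact Or.inr ⟨rec, by simp, kv, hkv, hx⟩
      · exact Or.inr ⟨r, by simp [hr], kv, hkv, hx⟩
    · rintro (h | ⟨r, hr, kv, hkv, hx⟩)
      · exact Or.inl (Or.inl h)
      · rcases List.mem_cons.mp hr with rfl | hr
        · exact Or.inl (Or.inr ⟨kv, hkv, hx⟩)
        · exact Or.inr ⟨r, hr, kv, hkv, hx⟩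

-- the flat list of keys B conceptually streams over
def pvKeys (records : List (List (String × String))) : List String :=
  records.flatMap (fun rec => rec.map Prod.fst)

lemma contains_keys_eq (records : List (List (String × String))) (al : String) :
    PySem.Set.contains
      (records.foldl (fun s rec => rec.foldl (fun s kv => PySem.Set.add s kv.1) s) PySem.Set.empty)
      al = (pvKeys records).contains al := by
  rw [Bool.eq_iff_iff]
  simp only [PySem.Set.contains_eq_listContains, List.contains_iff_mem, mem_keys_fold, pvKeys,
    List.mem_flatMap, List.mem_map]
  constructor
  · rintro (h | ⟨r, hr, kv, hkv, rfl⟩)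
    · simp [PySem.Set.empty] at h
    · exact ⟨r, hr, kv, hkv, rfl⟩
  · rintro ⟨r, hr, kv, hkv, rfl⟩
    exact Or.inr ⟨r, hr, kv, hkv, rfl⟩

-- B's nested fold is the fold over the flat key list
lemma foldl_step_flatten (records : List (List (String × String))) (b : PySem.Dict Int Int) :
    records.foldl (fun b rec => rec.foldl (fun b kv => pvStep b kv.1) b) b
      = (pvKeys records).foldl pvStep b := by
  induction records generalizing b with
  | nil => simp [pvKeys]
  | cons rec rest ih =>
    simp only [List.foldl_cons, pvKeys, List.flatMap_cons, List.foldl_append, ih]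
    congr 1
    rw [← List.foldl_map (f := Prod.fst) (g := pvStep)]

-- pvRev's contribution to each of the six groups is that group's own rank function
lemma pvRev_eq : pvRev = PySem.Dict.mk
      [("year", (0, 0)),
       ("Year", (0, 1)),
       ("YEAR", (0, 2)),
       ("yyyy", (0, 3)),
       ("YYYY", (0, 4)),
       ("month", (1, 0)),
       ("Month", (1, 1)),
       ("MONTH", (1, 2)),
       ("mm", (1, 3)),
       ("MM", (1, 4)),
       ("day", (2, 0)),
       ("Day", (2, 1)),
       ("DAY", (2, 2)),
       ("dd", (2, 3)),
       ("DD", (2, 4)),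
       ("hour", (3, 0)),
       ("Hour", (3, 1)),
       ("HOUR", (3, 2)),
       ("hh", (3, 3)),
       ("HH", (3, 4)),
       ("minute", (4, 0)),
       ("Minute", (4, 1)),
       ("MINUTE", (4, 2)),
       ("min", (4, 3)),
       ("MIN", (4, 4)),
       ("second", (5, 0)),
       ("Second", (5, 1)),
       ("SECOND", (5, 2)),
       ("sec", (5, 3)),
       ("SEC", (5, 4)),
       ("ss", (5, 5)),
       ("SS", (5, 6))] := by decide

lemma pvHit_eq_0 (k : String) : pvHit (0 : Int) k = pvHitG ["year", "Year", "YEAR", "yyyy", "YYYY"] k := by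
  rcases eq_or_ne k "year" with rfl | h0
  · decide
  rcases eq_or_ne k "Year" with rfl | h1
  · decide
  rcases eq_or_ne k "YEAR" with rfl | h2
  · decide
  rcases eq_or_ne k "yyyy" with rfl | h3
  · decide
  rcases eq_or_ne k "YYYY" with rfl | h4
  · decide
  rcases eq_or_ne k "month" with rfl | h5
  · decide
  rcases eq_or_ne k "Month" with rfl | h6
  · decide
  rcases eq_or_ne k "MONTH" with rfl | h7
  · decide
  rcases eq_or_ne k "mm" with rfl | h8
  · decide
  rcases eq_or_ne k "MM" with rfl | h9
  · decide
  rcases eq_or_ne k "day" with rfl | h10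
  · decide
  rcases eq_or_ne k "Day" with rfl | h11
  · decide
  rcases eq_or_ne k "DAY" with rfl | h12
  · decide
  rcases eq_or_ne k "dd" with rfl | h13
  · decide
  rcases eq_or_ne k "DD" with rfl | h14
  · decide
  rcases eq_or_ne k "hour" with rfl | h15
  · decide
  rcases eq_or_ne k "Hour" with rfl | h16
  · decide
  rcases eq_or_ne k "HOUR" with rfl | h17
  · decide
  rcases eq_or_ne k "hh" with rfl | h18
  · decide
  rcases eq_or_ne k "HH" with rfl | h19
  · decide
  rcases eq_or_ne k "minute" with rfl | h20
  · decide
  rcases eq_or_ne k "Minute" with rfl | h21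
  · decide
  rcases eq_or_ne k "MINUTE" with rfl | h22
  · decide
  rcases eq_or_ne k "min" with rfl | h23
  · decide
  rcases eq_or_ne k "MIN" with rfl | h24
  · decide
  rcases eq_or_ne k "second" with rfl | h25
  · decide
  rcases eq_or_ne k "Second" with rfl | h26
  · decide
  rcases eq_or_ne k "SECOND" with rfl | h27
  · decide
  rcases eq_or_ne k "sec" with rfl | h28
  · decide
  rcases eq_or_ne k "SEC" with rfl | h29
  · decide
  rcases eq_or_ne k "ss" with rfl | h30
  · decide
  rcases eq_or_ne k "SS" with rfl | h31
  · decide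
  have e0 : ("year" == k) = false := beq_eq_false_iff_ne.mpr (Ne.symm h0)
  have e1 : ("Year" == k) = false := beq_eq_false_iff_ne.mpr (Ne.symm h1)
  have e2 : ("YEAR" == k) = false := beq_eq_false_iff_ne.mpr (Ne.symm h2)
  have e3 : ("yyyy" == k) = false := beq_eq_false_iff_ne.mpr (Ne.symm h3)
  have e4 : ("YYYY" == k) = false := beq_eq_false_iff_ne.mpr (Ne.symm h4)
  have e5 : ("month" == k) = false := beq_eq_false_iff_ne.mpr (Ne.symm h5)
  have e6 : ("Month" == k) = false := beq_eq_false_iff_ne.mpr (Ne.symm h6)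
  have e7 : ("MONTH" == k) = false := beq_eq_false_iff_ne.mpr (Ne.symm h7)
  have e8 : ("mm" == k) = false := beq_eq_false_iff_ne.mpr (Ne.symm h8)
  have e9 : ("MM" == k) = false := beq_eq_false_iff_ne.mpr (Ne.symm h9)
  have e10 : ("day" == k) = false := beq_eq_false_iff_ne.mpr (Ne.symm h10)
  have e11 : ("Day" == k) = false := beq_eq_false_iff_ne.mpr (Ne.symm h11)
  have e12 : ("DAY" == k) = false := beq_eq_false_iff_ne.mpr (Ne.symm h12)
  have e13 : ("dd" == k) = false := beq_eq_false_iff_ne.mpr (Ne.symm h13)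
  have e14 : ("DD" == k) = false := beq_eq_false_iff_ne.mpr (Ne.symm h14)
  have e15 : ("hour" == k) = false := beq_eq_false_iff_ne.mpr (Ne.symm h15)
  have e16 : ("Hour" == k) = false := beq_eq_false_iff_ne.mpr (Ne.symm h16)
  have e17 : ("HOUR" == k) = false := beq_eq_false_iff_ne.mpr (Ne.symm h17)
  have e18 : ("hh" == k) = false := beq_eq_false_iff_ne.mpr (Ne.symm h18)
  have e19 : ("HH" == k) = false := beq_eq_false_iff_ne.mpr (Ne.symm h19)
  have e20 : ("minute" == k) = false := beq_eq_false_iff_ne.mpr (Ne.symm h20)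
  have e21 : ("Minute" == k) = false := beq_eq_false_iff_ne.mpr (Ne.symm h21)
  have e22 : ("MINUTE" == k) = false := beq_eq_false_iff_ne.mpr (Ne.symm h22)
  have e23 : ("min" == k) = false := beq_eq_false_iff_ne.mpr (Ne.symm h23)
  have e24 : ("MIN" == k) = false := beq_eq_false_iff_ne.mpr (Ne.symm h24)
  have e25 : ("second" == k) = false := beq_eq_false_iff_ne.mpr (Ne.symm h25)
  have e26 : ("Second" == k) = false := beq_eq_false_iff_ne.mpr (Ne.symm h26)
  have e27 : ("SECOND" == k) = false := beq_eq_false_iff_ne.mpr (Ne.symm h27)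
  have e28 : ("sec" == k) = false := beq_eq_false_iff_ne.mpr (Ne.symm h28)
  have e29 : ("SEC" == k) = false := beq_eq_false_iff_ne.mpr (Ne.symm h29)
  have e30 : ("ss" == k) = false := beq_eq_false_iff_ne.mpr (Ne.symm h30)
  have e31 : ("SS" == k) = false := beq_eq_false_iff_ne.mpr (Ne.symm h31)
  rw [pvHit, pvRev_eq]
  simp only [PySem.Dict.get?_mk_cons, e0, e1, e2, e3, e4, e5, e6, e7, e8, e9, e10, e11, e12, e13, e14, e15, e16, e17, e18, e19, e20, e21, e22, e23, e24, e25, e26, e27, e28, e29, e30, e31, pvHitG, Option.map_none]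
  rfl

lemma pvHit_eq_1 (k : String) : pvHit (1 : Int) k = pvHitG ["month", "Month", "MONTH", "mm", "MM"] k := by
  rcases eq_or_ne k "year" with rfl | h0
  · decide
  rcases eq_or_ne k "Year" with rfl | h1
  · decide
  rcases eq_or_ne k "YEAR" with rfl | h2
  · decide
  rcases eq_or_ne k "yyyy" with rfl | h3
  · decide
  rcases eq_or_ne k "YYYY" with rfl | h4
  · decide
  rcases eq_or_ne k "month" with rfl | h5
  · decide
  rcases eq_or_ne k "Month" with rfl | h6
  · decide
  rcases eq_or_ne k "MONTH" with rfl | h7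
  · decide
  rcases eq_or_ne k "mm" with rfl | h8
  · decide
  rcases eq_or_ne k "MM" with rfl | h9
  · decide
  rcases eq_or_ne k "day" with rfl | h10
  · decide
  rcases eq_or_ne k "Day" with rfl | h11
  · decide
  rcases eq_or_ne k "DAY" with rfl | h12
  · decide
  rcases eq_or_ne k "dd" with rfl | h13
  · decide
  rcases eq_or_ne k "DD" with rfl | h14
  · decide
  rcases eq_or_ne k "hour" with rfl | h15
  · decide
  rcases eq_or_ne k "Hour" with rfl | h16
  · decide
  rcases eq_or_ne k "HOUR" with rfl | h17
  · decide
  rcases eq_or_ne k "hh" with rfl | h18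
  · decide
  rcases eq_or_ne k "HH" with rfl | h19
  · decide
  rcases eq_or_ne k "minute" with rfl | h20
  · decide
  rcases eq_or_ne k "Minute" with rfl | h21
  · decide
  rcases eq_or_ne k "MINUTE" with rfl | h22
  · decide
  rcases eq_or_ne k "min" with rfl | h23
  · decide
  rcases eq_or_ne k "MIN" with rfl | h24
  · decide
  rcases eq_or_ne k "second" with rfl | h25
  · decide
  rcases eq_or_ne k "Second" with rfl | h26
  · decide
  rcases eq_or_ne k "SECOND" with rfl | h27
  · decide
  rcases eq_or_ne k "sec" with rfl | h28
  · decide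
  rcases eq_or_ne k "SEC" with rfl | h29
  · decide
  rcases eq_or_ne k "ss" with rfl | h30
  · decide
  rcases eq_or_ne k "SS" with rfl | h31
  · decide
  have e0 : ("year" == k) = false := beq_eq_false_iff_ne.mpr (Ne.symm h0)
  have e1 : ("Year" == k) = false := beq_eq_false_iff_ne.mpr (Ne.symm h1)
  have e2 : ("YEAR" == k) = false := beq_eq_false_iff_ne.mpr (Ne.symm h2)
  have e3 : ("yyyy" == k) = false := beq_eq_false_iff_ne.mpr (Ne.symm h3)
  have e4 : ("YYYY" == k) = false := beq_eq_false_iff_ne.mpr (Ne.symm h4)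
  have e5 : ("month" == k) = false := beq_eq_false_iff_ne.mpr (Ne.symm h5)
  have e6 : ("Month" == k) = false := beq_eq_false_iff_ne.mpr (Ne.symm h6)
  have e7 : ("MONTH" == k) = false := beq_eq_false_iff_ne.mpr (Ne.symm h7)
  have e8 : ("mm" == k) = false := beq_eq_false_iff_ne.mpr (Ne.symm h8)
  have e9 : ("MM" == k) = false := beq_eq_false_iff_ne.mpr (Ne.symm h9)
  have e10 : ("day" == k) = false := beq_eq_false_iff_ne.mpr (Ne.symm h10)
  have e11 : ("Day" == k) = false := beq_eq_false_iff_ne.mpr (Ne.symm h11)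
  have e12 : ("DAY" == k) = false := beq_eq_false_iff_ne.mpr (Ne.symm h12)
  have e13 : ("dd" == k) = false := beq_eq_false_iff_ne.mpr (Ne.symm h13)
  have e14 : ("DD" == k) = false := beq_eq_false_iff_ne.mpr (Ne.symm h14)
  have e15 : ("hour" == k) = false := beq_eq_false_iff_ne.mpr (Ne.symm h15)
  have e16 : ("Hour" == k) = false := beq_eq_false_iff_ne.mpr (Ne.symm h16)
  have e17 : ("HOUR" == k) = false := beq_eq_false_iff_ne.mpr (Ne.symm h17)
  have e18 : ("hh" == k) = false := beq_eq_false_iff_ne.mpr (Ne.symm h18)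
  have e19 : ("HH" == k) = false := beq_eq_false_iff_ne.mpr (Ne.symm h19)
  have e20 : ("minute" == k) = false := beq_eq_false_iff_ne.mpr (Ne.symm h20)
  have e21 : ("Minute" == k) = false := beq_eq_false_iff_ne.mpr (Ne.symm h21)
  have e22 : ("MINUTE" == k) = false := beq_eq_false_iff_ne.mpr (Ne.symm h22)
  have e23 : ("min" == k) = false := beq_eq_false_iff_ne.mpr (Ne.symm h23)
  have e24 : ("MIN" == k) = false := beq_eq_false_iff_ne.mpr (Ne.symm h24)
  have e25 : ("second" == k) = false := beq_eq_false_iff_ne.mpr (Ne.symm h25)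
  have e26 : ("Second" == k) = false := beq_eq_false_iff_ne.mpr (Ne.symm h26)
  have e27 : ("SECOND" == k) = false := beq_eq_false_iff_ne.mpr (Ne.symm h27)
  have e28 : ("sec" == k) = false := beq_eq_false_iff_ne.mpr (Ne.symm h28)
  have e29 : ("SEC" == k) = false := beq_eq_false_iff_ne.mpr (Ne.symm h29)
  have e30 : ("ss" == k) = false := beq_eq_false_iff_ne.mpr (Ne.symm h30)
  have e31 : ("SS" == k) = false := beq_eq_false_iff_ne.mpr (Ne.symm h31)
  rw [pvHit, pvRev_eq]
  simp only [PySem.Dict.get?_mk_cons, e0, e1, e2, e3, e4, e5, e6, e7, e8, e9, e10, e11, e12, e13, e14, e15, e16, e17, e18, e19, e20, e21, e22, e23, e24, e25, e26, e27, e28, e29, e30, e31, pvHitG, Option.map_none]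
  rfl

lemma pvHit_eq_2 (k : String) : pvHit (2 : Int) k = pvHitG ["day", "Day", "DAY", "dd", "DD"] k := by
  rcases eq_or_ne k "year" with rfl | h0
  · decide
  rcases eq_or_ne k "Year" with rfl | h1
  · decide
  rcases eq_or_ne k "YEAR" with rfl | h2
  · decide
  rcases eq_or_ne k "yyyy" with rfl | h3
  · decide
  rcases eq_or_ne k "YYYY" with rfl | h4
  · decide
  rcases eq_or_ne k "month" with rfl | h5
  · decide
  rcases eq_or_ne k "Month" with rfl | h6
  · decide
  rcases eq_or_ne k "MONTH" with rfl | h7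
  · decide
  rcases eq_or_ne k "mm" with rfl | h8
  · decide
  rcases eq_or_ne k "MM" with rfl | h9
  · decide
  rcases eq_or_ne k "day" with rfl | h10
  · decide
  rcases eq_or_ne k "Day" with rfl | h11
  · decide
  rcases eq_or_ne k "DAY" with rfl | h12
  · decide
  rcases eq_or_ne k "dd" with rfl | h13
  · decide
  rcases eq_or_ne k "DD" with rfl | h14
  · decide
  rcases eq_or_ne k "hour" with rfl | h15
  · decide
  rcases eq_or_ne k "Hour" with rfl | h16
  · decide
  rcases eq_or_ne k "HOUR" with rfl | h17
  · decide
  rcases eq_or_ne k "hh" with rfl | h18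
  · decide
  rcases eq_or_ne k "HH" with rfl | h19
  · decide
  rcases eq_or_ne k "minute" with rfl | h20
  · decide
  rcases eq_or_ne k "Minute" with rfl | h21
  · decide
  rcases eq_or_ne k "MINUTE" with rfl | h22
  · decide
  rcases eq_or_ne k "min" with rfl | h23
  · decide
  rcases eq_or_ne k "MIN" with rfl | h24
  · decide
  rcases eq_or_ne k "second" with rfl | h25
  · decide
  rcases eq_or_ne k "Second" with rfl | h26
  · decide
  rcases eq_or_ne k "SECOND" with rfl | h27
  · decide
  rcases eq_or_ne k "sec" with rfl | h28
  · decide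
  rcases eq_or_ne k "SEC" with rfl | h29
  · decide
  rcases eq_or_ne k "ss" with rfl | h30
  · decide
  rcases eq_or_ne k "SS" with rfl | h31
  · decide
  have e0 : ("year" == k) = false := beq_eq_false_iff_ne.mpr (Ne.symm h0)
  have e1 : ("Year" == k) = false := beq_eq_false_iff_ne.mpr (Ne.symm h1)
  have e2 : ("YEAR" == k) = false := beq_eq_false_iff_ne.mpr (Ne.symm h2)
  have e3 : ("yyyy" == k) = false := beq_eq_false_iff_ne.mpr (Ne.symm h3)
  have e4 : ("YYYY" == k) = false := beq_eq_false_iff_ne.mpr (Ne.symm h4)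
  have e5 : ("month" == k) = false := beq_eq_false_iff_ne.mpr (Ne.symm h5)
  have e6 : ("Month" == k) = false := beq_eq_false_iff_ne.mpr (Ne.symm h6)
  have e7 : ("MONTH" == k) = false := beq_eq_false_iff_ne.mpr (Ne.symm h7)
  have e8 : ("mm" == k) = false := beq_eq_false_iff_ne.mpr (Ne.symm h8)
  have e9 : ("MM" == k) = false := beq_eq_false_iff_ne.mpr (Ne.symm h9)
  have e10 : ("day" == k) = false := beq_eq_false_iff_ne.mpr (Ne.symm h10)
  have e11 : ("Day" == k) = false := beq_eq_false_iff_ne.mpr (Ne.symm h11)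
  have e12 : ("DAY" == k) = false := beq_eq_false_iff_ne.mpr (Ne.symm h12)
  have e13 : ("dd" == k) = false := beq_eq_false_iff_ne.mpr (Ne.symm h13)
  have e14 : ("DD" == k) = false := beq_eq_false_iff_ne.mpr (Ne.symm h14)
  have e15 : ("hour" == k) = false := beq_eq_false_iff_ne.mpr (Ne.symm h15)
  have e16 : ("Hour" == k) = false := beq_eq_false_iff_ne.mpr (Ne.symm h16)
  have e17 : ("HOUR" == k) = false := beq_eq_false_iff_ne.mpr (Ne.symm h17)
  have e18 : ("hh" == k) = false := beq_eq_false_iff_ne.mpr (Ne.symm h18)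
  have e19 : ("HH" == k) = false := beq_eq_false_iff_ne.mpr (Ne.symm h19)
  have e20 : ("minute" == k) = false := beq_eq_false_iff_ne.mpr (Ne.symm h20)
  have e21 : ("Minute" == k) = false := beq_eq_false_iff_ne.mpr (Ne.symm h21)
  have e22 : ("MINUTE" == k) = false := beq_eq_false_iff_ne.mpr (Ne.symm h22)
  have e23 : ("min" == k) = false := beq_eq_false_iff_ne.mpr (Ne.symm h23)
  have e24 : ("MIN" == k) = false := beq_eq_false_iff_ne.mpr (Ne.symm h24)
  have e25 : ("second" == k) = false := beq_eq_false_iff_ne.mpr (Ne.symm h25)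
  have e26 : ("Second" == k) = false := beq_eq_false_iff_ne.mpr (Ne.symm h26)
  have e27 : ("SECOND" == k) = false := beq_eq_false_iff_ne.mpr (Ne.symm h27)
  have e28 : ("sec" == k) = false := beq_eq_false_iff_ne.mpr (Ne.symm h28)
  have e29 : ("SEC" == k) = false := beq_eq_false_iff_ne.mpr (Ne.symm h29)
  have e30 : ("ss" == k) = false := beq_eq_false_iff_ne.mpr (Ne.symm h30)
  have e31 : ("SS" == k) = false := beq_eq_false_iff_ne.mpr (Ne.symm h31)
  rw [pvHit, pvRev_eq]
  simp only [PySem.Dict.get?_mk_cons, e0, e1, e2, e3, e4, e5, e6, e7, e8, e9, e10, e11, e12, e13, e14, e15, e16, e17, e18, e19, e20, e21, e22, e23, e24, e25, e26, e27, e28, e29, e30, e31, pvHitG, Option.map_none]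
  rfl

lemma pvHit_eq_3 (k : String) : pvHit (3 : Int) k = pvHitG ["hour", "Hour", "HOUR", "hh", "HH"] k := by
  rcases eq_or_ne k "year" with rfl | h0
  · decide
  rcases eq_or_ne k "Year" with rfl | h1
  · decide
  rcases eq_or_ne k "YEAR" with rfl | h2
  · decide
  rcases eq_or_ne k "yyyy" with rfl | h3
  · decide
  rcases eq_or_ne k "YYYY" with rfl | h4
  · decide
  rcases eq_or_ne k "month" with rfl | h5
  · decide
  rcases eq_or_ne k "Month" with rfl | h6
  · decide
  rcases eq_or_ne k "MONTH" with rfl | h7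
  · decide
  rcases eq_or_ne k "mm" with rfl | h8
  · decide
  rcases eq_or_ne k "MM" with rfl | h9
  · decide
  rcases eq_or_ne k "day" with rfl | h10
  · decide
  rcases eq_or_ne k "Day" with rfl | h11
  · decide
  rcases eq_or_ne k "DAY" with rfl | h12
  · decide
  rcases eq_or_ne k "dd" with rfl | h13
  · decide
  rcases eq_or_ne k "DD" with rfl | h14
  · decide
  rcases eq_or_ne k "hour" with rfl | h15
  · decide
  rcases eq_or_ne k "Hour" with rfl | h16
  · decide
  rcases eq_or_ne k "HOUR" with rfl | h17
  · decide
  rcases eq_or_ne k "hh" with rfl | h18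
  · decide
  rcases eq_or_ne k "HH" with rfl | h19
  · decide
  rcases eq_or_ne k "minute" with rfl | h20
  · decide
  rcases eq_or_ne k "Minute" with rfl | h21
  · decide
  rcases eq_or_ne k "MINUTE" with rfl | h22
  · decide
  rcases eq_or_ne k "min" with rfl | h23
  · decide
  rcases eq_or_ne k "MIN" with rfl | h24
  · decide
  rcases eq_or_ne k "second" with rfl | h25
  · decide
  rcases eq_or_ne k "Second" with rfl | h26
  · decide
  rcases eq_or_ne k "SECOND" with rfl | h27
  · decide
  rcases eq_or_ne k "sec" with rfl | h28
  · decide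
  rcases eq_or_ne k "SEC" with rfl | h29
  · decide
  rcases eq_or_ne k "ss" with rfl | h30
  · decide
  rcases eq_or_ne k "SS" with rfl | h31
  · decide
  have e0 : ("year" == k) = false := beq_eq_false_iff_ne.mpr (Ne.symm h0)
  have e1 : ("Year" == k) = false := beq_eq_false_iff_ne.mpr (Ne.symm h1)
  have e2 : ("YEAR" == k) = false := beq_eq_false_iff_ne.mpr (Ne.symm h2)
  have e3 : ("yyyy" == k) = false := beq_eq_false_iff_ne.mpr (Ne.symm h3)
  have e4 : ("YYYY" == k) = false := beq_eq_false_iff_ne.mpr (Ne.symm h4)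
  have e5 : ("month" == k) = false := beq_eq_false_iff_ne.mpr (Ne.symm h5)
  have e6 : ("Month" == k) = false := beq_eq_false_iff_ne.mpr (Ne.symm h6)
  have e7 : ("MONTH" == k) = false := beq_eq_false_iff_ne.mpr (Ne.symm h7)
  have e8 : ("mm" == k) = false := beq_eq_false_iff_ne.mpr (Ne.symm h8)
  have e9 : ("MM" == k) = false := beq_eq_false_iff_ne.mpr (Ne.symm h9)
  have e10 : ("day" == k) = false := beq_eq_false_iff_ne.mpr (Ne.symm h10)
  have e11 : ("Day" == k) = false := beq_eq_false_iff_ne.mpr (Ne.symm h11)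
  have e12 : ("DAY" == k) = false := beq_eq_false_iff_ne.mpr (Ne.symm h12)
  have e13 : ("dd" == k) = false := beq_eq_false_iff_ne.mpr (Ne.symm h13)
  have e14 : ("DD" == k) = false := beq_eq_false_iff_ne.mpr (Ne.symm h14)
  have e15 : ("hour" == k) = false := beq_eq_false_iff_ne.mpr (Ne.symm h15)
  have e16 : ("Hour" == k) = false := beq_eq_false_iff_ne.mpr (Ne.symm h16)
  have e17 : ("HOUR" == k) = false := beq_eq_false_iff_ne.mpr (Ne.symm h17)
  have e18 : ("hh" == k) = false := beq_eq_false_iff_ne.mpr (Ne.symm h18)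
  have e19 : ("HH" == k) = false := beq_eq_false_iff_ne.mpr (Ne.symm h19)
  have e20 : ("minute" == k) = false := beq_eq_false_iff_ne.mpr (Ne.symm h20)
  have e21 : ("Minute" == k) = false := beq_eq_false_iff_ne.mpr (Ne.symm h21)
  have e22 : ("MINUTE" == k) = false := beq_eq_false_iff_ne.mpr (Ne.symm h22)
  have e23 : ("min" == k) = false := beq_eq_false_iff_ne.mpr (Ne.symm h23)
  have e24 : ("MIN" == k) = false := beq_eq_false_iff_ne.mpr (Ne.symm h24)
  have e25 : ("second" == k) = false := beq_eq_false_iff_ne.mpr (Ne.symm h25)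
  have e26 : ("Second" == k) = false := beq_eq_false_iff_ne.mpr (Ne.symm h26)
  have e27 : ("SECOND" == k) = false := beq_eq_false_iff_ne.mpr (Ne.symm h27)
  have e28 : ("sec" == k) = false := beq_eq_false_iff_ne.mpr (Ne.symm h28)
  have e29 : ("SEC" == k) = false := beq_eq_false_iff_ne.mpr (Ne.symm h29)
  have e30 : ("ss" == k) = false := beq_eq_false_iff_ne.mpr (Ne.symm h30)
  have e31 : ("SS" == k) = false := beq_eq_false_iff_ne.mpr (Ne.symm h31)
  rw [pvHit, pvRev_eq]
  simp only [PySem.Dict.get?_mk_cons, e0, e1, e2, e3, e4, e5, e6, e7, e8, e9, e10, e11, e12, e13, e14, e15, e16, e17, e18, e19, e20, e21, e22, e23, e24, e25, e26, e27, e28, e29, e30, e31, pvHitG, Option.map_none]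
  rfl

lemma pvHit_eq_4 (k : String) : pvHit (4 : Int) k = pvHitG ["minute", "Minute", "MINUTE", "min", "MIN"] k := by
  rcases eq_or_ne k "year" with rfl | h0
  · decide
  rcases eq_or_ne k "Year" with rfl | h1
  · decide
  rcases eq_or_ne k "YEAR" with rfl | h2
  · decide
  rcases eq_or_ne k "yyyy" with rfl | h3
  · decide
  rcases eq_or_ne k "YYYY" with rfl | h4
  · decide
  rcases eq_or_ne k "month" with rfl | h5
  · decide
  rcases eq_or_ne k "Month" with rfl | h6
  · decide
  rcases eq_or_ne k "MONTH" with rfl | h7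
  · decide
  rcases eq_or_ne k "mm" with rfl | h8
  · decide
  rcases eq_or_ne k "MM" with rfl | h9
  · decide
  rcases eq_or_ne k "day" with rfl | h10
  · decide
  rcases eq_or_ne k "Day" with rfl | h11
  · decide
  rcases eq_or_ne k "DAY" with rfl | h12
  · decide
  rcases eq_or_ne k "dd" with rfl | h13
  · decide
  rcases eq_or_ne k "DD" with rfl | h14
  · decide
  rcases eq_or_ne k "hour" with rfl | h15
  · decide
  rcases eq_or_ne k "Hour" with rfl | h16
  · decide
  rcases eq_or_ne k "HOUR" with rfl | h17
  · decide
  rcases eq_or_ne k "hh" with rfl | h18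
  · decide
  rcases eq_or_ne k "HH" with rfl | h19
  · decide
  rcases eq_or_ne k "minute" with rfl | h20
  · decide
  rcases eq_or_ne k "Minute" with rfl | h21
  · decide
  rcases eq_or_ne k "MINUTE" with rfl | h22
  · decide
  rcases eq_or_ne k "min" with rfl | h23
  · decide
  rcases eq_or_ne k "MIN" with rfl | h24
  · decide
  rcases eq_or_ne k "second" with rfl | h25
  · decide
  rcases eq_or_ne k "Second" with rfl | h26
  · decide
  rcases eq_or_ne k "SECOND" with rfl | h27
  · decide
  rcases eq_or_ne k "sec" with rfl | h28
  · decide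
  rcases eq_or_ne k "SEC" with rfl | h29
  · decide
  rcases eq_or_ne k "ss" with rfl | h30
  · decide
  rcases eq_or_ne k "SS" with rfl | h31
  · decide
  have e0 : ("year" == k) = false := beq_eq_false_iff_ne.mpr (Ne.symm h0)
  have e1 : ("Year" == k) = false := beq_eq_false_iff_ne.mpr (Ne.symm h1)
  have e2 : ("YEAR" == k) = false := beq_eq_false_iff_ne.mpr (Ne.symm h2)
  have e3 : ("yyyy" == k) = false := beq_eq_false_iff_ne.mpr (Ne.symm h3)
  have e4 : ("YYYY" == k) = false := beq_eq_false_iff_ne.mpr (Ne.symm h4)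
  have e5 : ("month" == k) = false := beq_eq_false_iff_ne.mpr (Ne.symm h5)
  have e6 : ("Month" == k) = false := beq_eq_false_iff_ne.mpr (Ne.symm h6)
  have e7 : ("MONTH" == k) = false := beq_eq_false_iff_ne.mpr (Ne.symm h7)
  have e8 : ("mm" == k) = false := beq_eq_false_iff_ne.mpr (Ne.symm h8)
  have e9 : ("MM" == k) = false := beq_eq_false_iff_ne.mpr (Ne.symm h9)
  have e10 : ("day" == k) = false := beq_eq_false_iff_ne.mpr (Ne.symm h10)
  have e11 : ("Day" == k) = false := beq_eq_false_iff_ne.mpr (Ne.symm h11)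
  have e12 : ("DAY" == k) = false := beq_eq_false_iff_ne.mpr (Ne.symm h12)
  have e13 : ("dd" == k) = false := beq_eq_false_iff_ne.mpr (Ne.symm h13)
  have e14 : ("DD" == k) = false := beq_eq_false_iff_ne.mpr (Ne.symm h14)
  have e15 : ("hour" == k) = false := beq_eq_false_iff_ne.mpr (Ne.symm h15)
  have e16 : ("Hour" == k) = false := beq_eq_false_iff_ne.mpr (Ne.symm h16)
  have e17 : ("HOUR" == k) = false := beq_eq_false_iff_ne.mpr (Ne.symm h17)
  have e18 : ("hh" == k) = false := beq_eq_false_iff_ne.mpr (Ne.symm h18)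
  have e19 : ("HH" == k) = false := beq_eq_false_iff_ne.mpr (Ne.symm h19)
  have e20 : ("minute" == k) = false := beq_eq_false_iff_ne.mpr (Ne.symm h20)
  have e21 : ("Minute" == k) = false := beq_eq_false_iff_ne.mpr (Ne.symm h21)
  have e22 : ("MINUTE" == k) = false := beq_eq_false_iff_ne.mpr (Ne.symm h22)
  have e23 : ("min" == k) = false := beq_eq_false_iff_ne.mpr (Ne.symm h23)
  have e24 : ("MIN" == k) = false := beq_eq_false_iff_ne.mpr (Ne.symm h24)
  have e25 : ("second" == k) = false := beq_eq_false_iff_ne.mpr (Ne.symm h25)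
  have e26 : ("Second" == k) = false := beq_eq_false_iff_ne.mpr (Ne.symm h26)
  have e27 : ("SECOND" == k) = false := beq_eq_false_iff_ne.mpr (Ne.symm h27)
  have e28 : ("sec" == k) = false := beq_eq_false_iff_ne.mpr (Ne.symm h28)
  have e29 : ("SEC" == k) = false := beq_eq_false_iff_ne.mpr (Ne.symm h29)
  have e30 : ("ss" == k) = false := beq_eq_false_iff_ne.mpr (Ne.symm h30)
  have e31 : ("SS" == k) = false := beq_eq_false_iff_ne.mpr (Ne.symm h31)
  rw [pvHit, pvRev_eq]
  simp only [PySem.Dict.get?_mk_cons, e0, e1, e2, e3, e4, e5, e6, e7, e8, e9, e10, e11, e12, e13, e14, e15, e16, e17, e18, e19, e20, e21, e22, e23, e24, e25, e26, e27, e28, e29, e30, e31, pvHitG, Option.map_none]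
  rfl

lemma pvHit_eq_5 (k : String) : pvHit (5 : Int) k = pvHitG ["second", "Second", "SECOND", "sec", "SEC", "ss", "SS"] k := by
  rcases eq_or_ne k "year" with rfl | h0
  · decide
  rcases eq_or_ne k "Year" with rfl | h1
  · decide
  rcases eq_or_ne k "YEAR" with rfl | h2
  · decide
  rcases eq_or_ne k "yyyy" with rfl | h3
  · decide
  rcases eq_or_ne k "YYYY" with rfl | h4
  · decide
  rcases eq_or_ne k "month" with rfl | h5
  · decide
  rcases eq_or_ne k "Month" with rfl | h6
  · decide
  rcases eq_or_ne k "MONTH" with rfl | h7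
  · decide
  rcases eq_or_ne k "mm" with rfl | h8
  · decide
  rcases eq_or_ne k "MM" with rfl | h9
  · decide
  rcases eq_or_ne k "day" with rfl | h10
  · decide
  rcases eq_or_ne k "Day" with rfl | h11
  · decide
  rcases eq_or_ne k "DAY" with rfl | h12
  · decide
  rcases eq_or_ne k "dd" with rfl | h13
  · decide
  rcases eq_or_ne k "DD" with rfl | h14
  · decide
  rcases eq_or_ne k "hour" with rfl | h15
  · decide
  rcases eq_or_ne k "Hour" with rfl | h16
  · decide
  rcases eq_or_ne k "HOUR" with rfl | h17
  · decide
  rcases eq_or_ne k "hh" with rfl | h18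
  · decide
  rcases eq_or_ne k "HH" with rfl | h19
  · decide
  rcases eq_or_ne k "minute" with rfl | h20
  · decide
  rcases eq_or_ne k "Minute" with rfl | h21
  · decide
  rcases eq_or_ne k "MINUTE" with rfl | h22
  · decide
  rcases eq_or_ne k "min" with rfl | h23
  · decide
  rcases eq_or_ne k "MIN" with rfl | h24
  · decide
  rcases eq_or_ne k "second" with rfl | h25
  · decide
  rcases eq_or_ne k "Second" with rfl | h26
  · decide
  rcases eq_or_ne k "SECOND" with rfl | h27
  · decide
  rcases eq_or_ne k "sec" with rfl | h28
  · decide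
  rcases eq_or_ne k "SEC" with rfl | h29
  · decide
  rcases eq_or_ne k "ss" with rfl | h30
  · decide
  rcases eq_or_ne k "SS" with rfl | h31
  · decide
  have e0 : ("year" == k) = false := beq_eq_false_iff_ne.mpr (Ne.symm h0)
  have e1 : ("Year" == k) = false := beq_eq_false_iff_ne.mpr (Ne.symm h1)
  have e2 : ("YEAR" == k) = false := beq_eq_false_iff_ne.mpr (Ne.symm h2)
  have e3 : ("yyyy" == k) = false := beq_eq_false_iff_ne.mpr (Ne.symm h3)
  have e4 : ("YYYY" == k) = false := beq_eq_false_iff_ne.mpr (Ne.symm h4)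
  have e5 : ("month" == k) = false := beq_eq_false_iff_ne.mpr (Ne.symm h5)
  have e6 : ("Month" == k) = false := beq_eq_false_iff_ne.mpr (Ne.symm h6)
  have e7 : ("MONTH" == k) = false := beq_eq_false_iff_ne.mpr (Ne.symm h7)
  have e8 : ("mm" == k) = false := beq_eq_false_iff_ne.mpr (Ne.symm h8)
  have e9 : ("MM" == k) = false := beq_eq_false_iff_ne.mpr (Ne.symm h9)
  have e10 : ("day" == k) = false := beq_eq_false_iff_ne.mpr (Ne.symm h10)
  have e11 : ("Day" == k) = false := beq_eq_false_iff_ne.mpr (Ne.symm h11)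
  have e12 : ("DAY" == k) = false := beq_eq_false_iff_ne.mpr (Ne.symm h12)
  have e13 : ("dd" == k) = false := beq_eq_false_iff_ne.mpr (Ne.symm h13)
  have e14 : ("DD" == k) = false := beq_eq_false_iff_ne.mpr (Ne.symm h14)
  have e15 : ("hour" == k) = false := beq_eq_false_iff_ne.mpr (Ne.symm h15)
  have e16 : ("Hour" == k) = false := beq_eq_false_iff_ne.mpr (Ne.symm h16)
  have e17 : ("HOUR" == k) = false := beq_eq_false_iff_ne.mpr (Ne.symm h17)
  have e18 : ("hh" == k) = false := beq_eq_false_iff_ne.mpr (Ne.symm h18)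
  have e19 : ("HH" == k) = false := beq_eq_false_iff_ne.mpr (Ne.symm h19)
  have e20 : ("minute" == k) = false := beq_eq_false_iff_ne.mpr (Ne.symm h20)
  have e21 : ("Minute" == k) = false := beq_eq_false_iff_ne.mpr (Ne.symm h21)
  have e22 : ("MINUTE" == k) = false := beq_eq_false_iff_ne.mpr (Ne.symm h22)
  have e23 : ("min" == k) = false := beq_eq_false_iff_ne.mpr (Ne.symm h23)
  have e24 : ("MIN" == k) = false := beq_eq_false_iff_ne.mpr (Ne.symm h24)
  have e25 : ("second" == k) = false := beq_eq_false_iff_ne.mpr (Ne.symm h25)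
  have e26 : ("Second" == k) = false := beq_eq_false_iff_ne.mpr (Ne.symm h26)
  have e27 : ("SECOND" == k) = false := beq_eq_false_iff_ne.mpr (Ne.symm h27)
  have e28 : ("sec" == k) = false := beq_eq_false_iff_ne.mpr (Ne.symm h28)
  have e29 : ("SEC" == k) = false := beq_eq_false_iff_ne.mpr (Ne.symm h29)
  have e30 : ("ss" == k) = false := beq_eq_false_iff_ne.mpr (Ne.symm h30)
  have e31 : ("SS" == k) = false := beq_eq_false_iff_ne.mpr (Ne.symm h31)
  rw [pvHit, pvRev_eq]
  simp only [PySem.Dict.get?_mk_cons, e0, e1, e2, e3, e4, e5, e6, e7, e8, e9, e10, e11, e12, e13, e14, e15, e16, e17, e18, e19, e20, e21, e22, e23, e24, e25, e26, e27, e28, e29, e30, e31, pvHitG, Option.map_none]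
  rfl

-- the fold-with-append over the alias table is a filterMap (A's outer loop shape)
lemma foldl_first_hit_eq_filterMap (p : String → Bool) (L : List (List String)) (acc : List String) :
    L.foldl (fun time_cols aliases =>
      match aliases.find? p with
      | some al => time_cols ++ [al]
      | none => time_cols) acc = acc ++ L.filterMap (fun aliases => aliases.find? p) := by
  induction L generalizing acc with
  | nil => simp
  | cons hd tl ih =>
    simp only [List.foldl_cons, List.filterMap_cons]
    cases h : hd.find? p with
    | none => simp [ih]
    | some a => simp [ih]

-- per group gi, B's emitted element is A's first-present alias of that group
lemma best_group (records : List (List (String × String))) (gi : Int) (g : List String)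
    (heq : ∀ k, pvHit gi k = pvHitG g k) :
    ((((pvKeys records).foldl pvStep PySem.Dict.empty).get? gi).map
        (fun r => PySem.List.pyGetD g r ""))
      = g.find? (fun a => (pvKeys records).contains a) := by
  rw [foldl_step_get, PySem.Dict.get?_empty]
  have h1 : pvM gi (pvKeys records) = pvMG g (pvKeys records) := by
    simp only [pvM, pvMG]
    congr 1
    funext m k
    rw [heq]
  cases hm : pvM gi (pvKeys records) with
  | none => rw [← pvMG_find, ← h1, hm]; simp [pvOmin]
  | some r => rw [← pvMG_find, ← h1, hm]; simp [pvOmin]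

-- ===== VERDICT (by name: the statement is the Claim_ definition above) =====
theorem detect_time_columns_py_spec : Claim_equal_detect_time_columns_py := by
  intro records _
  unfold Spec_detect_time_columns_py detect_time_columns_py detect_time_columns_py_alt
  rw [foldl_first_hit_eq_filterMap, List.nil_append, foldl_step_flatten]
  simp only [contains_keys_eq]
  have e : PySem.List.enumerate pvAliasTable 0
      = [((0 : Int), ["year", "Year", "YEAR", "yyyy", "YYYY"]), ((1 : Int), ["month", "Month", "MONTH", "mm", "MM"]), ((2 : Int), ["day", "Day", "DAY", "dd", "DD"]),
         ((3 : Int), ["hour", "Hour", "HOUR", "hh", "HH"]), ((4 : Int), ["minute", "Minute", "MINUTE", "min", "MIN"]), ((5 : Int), ["second", "Second", "SECOND", "sec", "SEC", "ss", "SS"])] := by rfl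
  rw [e]
  simp only [List.filterMap_cons, List.filterMap_nil, pvAliasTable]
  rw [best_group records 0 _ pvHit_eq_0, best_group records 1 _ pvHit_eq_1,
      best_group records 2 _ pvHit_eq_2, best_group records 3 _ pvHit_eq_3,
      best_group records 4 _ pvHit_eq_4, best_group records 5 _ pvHit_eq_5]
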